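-- pv_equiv track=rewrite | github.com/mithileshkumarrnaik/internal-linking | helpers/process.py | filter_external_links
-- ===== SOURCE A (Python) =====
-- def filter_external_links(links, exclusion_list, inclusion_list=None):
--     """
--     Filters links based on exclusion and inclusion lists.
--
--     Args:
--     - links (list): List of links to filter.
--     - exclusion_list (list): List of domains/URLs to exclude.
--     - inclusion_list (list): List of domains/URLs to prioritize (optional).
--
--     Returns:
--     - dict: {'included': [prioritized links], 'filtered': [remaining links]}
--     """
--     included = []
--     filtered = []
--
--     for link in links:
--         domain = link.split("/")[2] if "://" in link else link  # Extract domain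
--
--         if any(excl in domain for excl in exclusion_list):
--             continue  # Skip excluded domains
--         elif inclusion_list and any(incl in domain for incl in inclusion_list):
--             included.append(link)  # Add to prioritized list
--         else:
--             filtered.append(link)
--
--     return {"included": included, "filtered": filtered}
-- ===== SOURCE B (Python) =====
-- def filter_external_links(links, exclusion_list, inclusion_list=None):
--     """Staged passes instead of one loop: drop excluded links first,
--     then partition the survivors by the inclusion list."""
--     def matches(link, patterns):
--         domain = link.split("/")[2] if "://" in link else link
--         return any(p in domain for p in patterns)
--
--     survivors = [l for l in links if not matches(l, exclusion_list)]
--     if not inclusion_list: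
--         return {"included": [], "filtered": survivors}
--     return {"included": [l for l in survivors if matches(l, inclusion_list)],
--             "filtered": [l for l in survivors if not matches(l, inclusion_list)]}
-- ===== Notes on version B (the rewrite author's own statement) =====
-- stated objective: simpler
-- what changed: A threads two accumulator lists through one imperative loop with continue/elif/else; B works in staged passes: one filter pass removes excluded links, then (only if an inclusion list is given) the survivors are partitioned by inclusion, with an early return of ([], survivors) when there is none.
import Mathlib
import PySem

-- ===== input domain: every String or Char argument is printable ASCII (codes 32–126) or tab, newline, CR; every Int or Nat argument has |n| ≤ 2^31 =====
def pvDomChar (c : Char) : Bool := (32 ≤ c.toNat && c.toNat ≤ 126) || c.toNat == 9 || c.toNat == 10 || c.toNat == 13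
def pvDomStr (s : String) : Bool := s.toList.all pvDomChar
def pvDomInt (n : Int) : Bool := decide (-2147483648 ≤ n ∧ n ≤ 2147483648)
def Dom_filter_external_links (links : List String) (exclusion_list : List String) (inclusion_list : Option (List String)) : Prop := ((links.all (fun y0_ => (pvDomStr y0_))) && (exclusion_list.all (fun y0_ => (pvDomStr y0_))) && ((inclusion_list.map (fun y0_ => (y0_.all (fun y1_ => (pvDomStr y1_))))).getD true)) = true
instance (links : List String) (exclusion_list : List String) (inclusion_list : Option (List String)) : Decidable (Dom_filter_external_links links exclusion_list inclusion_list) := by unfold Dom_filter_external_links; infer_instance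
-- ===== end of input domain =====

-- B replaces A's single loop threading two accumulators by staged passes: one filter pass
-- removing excluded links, then a partition of the survivors by the inclusion list (simpler).


-- ===== PORT A =====
-- link.split("/")[2] if "://" in link else link ; the [2] index is always in range when
-- "://" ⊆ link (the split then has ≥ 3 pieces), so the .getD "" default is never taken.
def feDomainA (link : String) : String :=
  if PySem.Str.isIn "://" link then (PySem.List.pyGet? ((PySem.Str.split? link "/").getD []) (2 : Int)).getD "" else link

def filter_external_links (links : List String) (exclusion_list : List String) (inclusion_list : Option (List String)) : List (String × List String) :=
  let res := links.foldl (fun (st : List String × List String) link =>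
    let domain := feDomainA link
    if exclusion_list.any (fun excl => PySem.Str.isIn excl domain) then
      st
    else if (match inclusion_list with
             | none => false
             | some l => !l.isEmpty && l.any (fun incl => PySem.Str.isIn incl domain)) then
      (st.1 ++ [link], st.2)
    else
      (st.1, st.2 ++ [link])) ([], [])
  [("included", res.1), ("filtered", res.2)]

-- ===== PORT B =====
def feMatches (link : String) (patterns : List String) : Bool :=
  let domain := if PySem.Str.isIn "://" link then (PySem.List.pyGet? ((PySem.Str.split? link "/").getD []) (2 : Int)).getD "" else link
  patterns.any (fun p => PySem.Str.isIn p domain)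

def filter_external_links_alt (links : List String) (exclusion_list : List String) (inclusion_list : Option (List String)) : List (String × List String) :=
  let survivors := links.filter (fun l => !feMatches l exclusion_list)
  match inclusion_list with
  | none => [("included", []), ("filtered", survivors)]
  | some il =>
    if il.isEmpty then [("included", []), ("filtered", survivors)]
    else [("included", survivors.filter (fun l => feMatches l il)),
          ("filtered", survivors.filter (fun l => !feMatches l il))]

-- ===== PRECONDITION & SPEC =====
def Spec_filter_external_links (links : List String) (exclusion_list : List String) (inclusion_list : Option (List String)) (out : List (String × List String)) : Prop := out = filter_external_links_alt links exclusion_list inclusion_list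
instance (links : List String) (exclusion_list : List String) (inclusion_list : Option (List String)) (out : List (String × List String)) : Decidable (Spec_filter_external_links links exclusion_list inclusion_list out) := by unfold Spec_filter_external_links; infer_instance

-- ===== CLAIM (what is proved, stated in full; the proofs are below) =====
def Claim_equal_filter_external_links : Prop := ∀ (links : List String) (exclusion_list : List String) (inclusion_list : Option (List String)), Dom_filter_external_links links exclusion_list inclusion_list → Spec_filter_external_links links exclusion_list inclusion_list (filter_external_links links exclusion_list inclusion_list)

-- ===== LEMMAS AND PROOFS =====
-- Generic loop invariant: a fold that skips on pE, appends to the first bucket on pI and to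
-- the second otherwise, equals filtering out pE and then splitting the survivors by pI.
lemma fe_loop (pE pI : String → Bool) (links : List String) (acc : List String × List String) :
    links.foldl (fun (st : List String × List String) l =>
      if pE l then st
      else if pI l then (st.1 ++ [l], st.2)
      else (st.1, st.2 ++ [l])) acc
    = (acc.1 ++ ((links.filter (fun l => !pE l)).filter pI),
       acc.2 ++ ((links.filter (fun l => !pE l)).filter (fun l => !pI l))) := by
  induction links generalizing acc with
  | nil => simp
  | cons l ls ih =>
    simp only [List.foldl_cons, List.filter_cons, ih]
    by_cases h1 : pE l
    · simp [h1]
    · by_cases h2 : pI l <;> simp [h1, h2]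

-- ===== VERDICT (by name: the statement is the Claim_ definition above) =====
theorem filter_external_links_spec : Claim_equal_filter_external_links := by
  intro links ex inc _
  unfold Spec_filter_external_links filter_external_links filter_external_links_alt
  rcases inc with _ | il
  · simp only [fe_loop]
    simp [feMatches, feDomainA]
  · by_cases he : il.isEmpty
    · simp only [fe_loop]
      simp [feMatches, feDomainA, he, List.filter_filter]
    · simp only [fe_loop]
      simp [feMatches, feDomainA, he, List.filter_filter]
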